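-- pv_equiv track=rewrite | github.com/Karvenko/DiplomCode | Deal.py | hand_to_vec
-- ===== SOURCE A (Python) =====
-- card_dict = {
--     '2' : 0,
--     '3' : 1,
--     '4' : 2,
--     '5' : 3,
--     '6' : 4,
--     '7' : 5,
--     '8' : 6,
--     '9' : 7,
--     'T' : 8,
--     'J' : 9,
--     'Q' : 10,
--     'K' : 11,
--     'A' : 12
-- }
--
-- def hand_to_vec(hand):
--     """Converts text string into 52x[0,1]
--     Order - SHDC, 2 - lowest, A - highest"""
--     vec = [0]*52
--
--     hand = hand.upper()
--
--     offset = 0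
--     for suit in hand.split('.'):
--         if len(suit) > 0:
--             for card in suit:
--                 vec[offset + card_dict[card]] = 1
--
--         offset += 13
--
--     return vec
-- ===== SOURCE B (Python) =====
-- def hand_to_vec(hand):
--     """Converts text string into 52x[0,1]
--     Order - SHDC, 2 - lowest, A - highest"""
--     suits = hand.upper().split('.')
--     ranks = '23456789TJQKA'
--     return [1 if s < len(suits) and ranks[r] in suits[s] else 0
--             for s in range(4) for r in range(13)]
-- ===== Notes on version B (the rewrite author's own statement) =====
-- stated objective: alternative
-- what changed: B inverts the data flow: instead of scanning the hand and writing bits into a mutated 52-slot array, it splits once and generates the 52 output positions directly, testing each (suit, rank) pair for membership in its suit string; card_dict disappears entirely.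
import Mathlib
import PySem

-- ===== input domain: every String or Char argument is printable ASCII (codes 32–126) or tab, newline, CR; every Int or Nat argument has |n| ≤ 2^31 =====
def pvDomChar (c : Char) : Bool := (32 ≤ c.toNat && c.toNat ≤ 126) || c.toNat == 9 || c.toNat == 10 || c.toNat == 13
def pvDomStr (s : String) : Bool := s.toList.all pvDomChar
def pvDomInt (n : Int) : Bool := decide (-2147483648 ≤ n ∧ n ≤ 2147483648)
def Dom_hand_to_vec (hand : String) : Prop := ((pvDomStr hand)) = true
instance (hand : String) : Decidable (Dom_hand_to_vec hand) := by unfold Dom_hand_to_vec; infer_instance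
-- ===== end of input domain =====

-- B inverts the scan: instead of walking the hand and writing bits into a 52-array, it walks the
-- 52 output positions and tests each card's rank for membership in its suit segment (objective: alternative).

-- ===== PORT A =====
def card_dict : PySem.Dict Char Int :=
  PySem.Dict.ofList [('2',0),('3',1),('4',2),('5',3),('6',4),('7',5),('8',6),
                     ('9',7),('T',8),('J',9),('Q',10),('K',11),('A',12)]

def cardIdx (c : Char) : Int := PySem.Dict.getD card_dict c 0

-- one iteration of A's outer loop: process one suit, then offset += 13
def suitStep (st : List Int × Int) (suit : List Char) : List Int × Int :=
  (if 0 < suit.length then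
     suit.foldl (fun v card => PySem.List.pySetD v (st.2 + cardIdx card) 1) st.1
   else st.1,
   st.2 + 13)

def hand_to_vec (hand : String) : List Int :=
  let vec : List Int := List.replicate 52 0
  let h := PySem.Str.upper hand
  ((PySem.Chars.splitOn h.toList ['.']).foldl suitStep (vec, 0)).1

-- ===== PORT B =====
-- Source B's ranks string '23456789TJQKA'
def ranksB : List Char := ['2','3','4','5','6','7','8','9','T','J','Q','K','A']

-- the nested comprehension 'for s in range(4) for r in range(13)'; ranks[r] is always in range
-- (r < 13 = len(ranks)) and suits[s] is guarded by s < len(suits), so pyGetD is exact here;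
-- a single-character 'in' test on a string is exactly element membership (ported via Chars.isIn).
def hand_to_vec_alt (hand : String) : List Int :=
  let suits := PySem.Chars.splitOn (PySem.Str.upper hand).toList ['.']
  (PySem.List.pyRange 0 4 1).flatMap (fun s =>
    (PySem.List.pyRange 0 13 1).map (fun r =>
      if decide (s < (suits.length : Int)) &&
         PySem.Chars.isIn [PySem.List.pyGetD ranksB r ' '] (PySem.List.pyGetD suits s [])
      then 1 else 0))

-- ===== PRECONDITION & SPEC =====
def cardChars : List Char := ['2','3','4','5','6','7','8','9','T','J','Q','K','A']

-- Pre_ excludes exactly the inputs where Python A raises: a KeyError on a non-separator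
-- character that (uppercased) is not a card symbol, or an IndexError on a card character
-- preceded by more than three suit separators (offset beyond the 52-entry vector).
def Pre_hand_to_vec (hand : String) : Prop :=
  ∀ i : Nat, i < hand.toList.length → hand.toList[i]! ≠ '.' →
    (PySem.Chars.upperChar hand.toList[i]! ∈ cardChars ∧ (hand.toList.take i).count '.' ≤ 3)

instance (hand : String) : Decidable (Pre_hand_to_vec hand) := by
  unfold Pre_hand_to_vec; infer_instance

def pvWitness_hand_to_vec : String := "AK3.t2.q."

def Spec_hand_to_vec (hand : String) (out : List Int) : Prop := out = hand_to_vec_alt hand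
instance (hand : String) (out : List Int) : Decidable (Spec_hand_to_vec hand out) := by unfold Spec_hand_to_vec; infer_instance

-- ===== CLAIM (what is proved, stated in full; the proofs are below) =====
def Claim_equal_hand_to_vec : Prop := ∀ (hand : String), Dom_hand_to_vec hand → Pre_hand_to_vec hand → Spec_hand_to_vec hand (hand_to_vec hand)

-- ===== LEMMAS AND PROOFS =====

-- reference splitter: mySplit cur l = (cur ++ first segment) :: remaining segments of l on '.'
def mySplit : List Char → List Char → List (List Char)
  | cur, [] => [cur]
  | cur, c :: rest => if c = '.' then cur :: mySplit [] rest else mySplit (cur ++ [c]) rest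

lemma go_eq : ∀ (fuel : Nat) (l cur : List Char) (acc : List (List Char)), l.length < fuel →
    PySem.Chars.splitOn.go ['.'] fuel l cur acc = acc.reverse ++ mySplit cur.reverse l := by
  intro fuel
  induction fuel with
  | zero => intro l cur acc h; omega
  | succ n ih =>
    intro l cur acc h
    cases l with
    | nil => simp [PySem.Chars.splitOn.go, mySplit]
    | cons c rest =>
      simp only [PySem.Chars.splitOn.go, List.isPrefixOf, List.drop, List.length] at *
      by_cases hc : c = '.'
      · subst hc
        rw [if_pos (by simp)]
        rw [ih rest [] (cur.reverse :: acc) (by omega)]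
        simp [mySplit]
      · have hbc : ('.' == c) = false := by
          simp only [beq_eq_false_iff_ne, ne_eq]
          exact fun hh => hc hh.symm
        rw [if_neg (by simp [hbc])]
        rw [ih rest (c :: cur) acc (by omega)]
        simp [mySplit, hc]

lemma splitOn_eq (l : List Char) : PySem.Chars.splitOn l ['.'] = mySplit [] l := by
  unfold PySem.Chars.splitOn
  rw [go_eq (l.length + 1) l [] [] (by omega)]
  simp

-- the effect of A's inner loop on the vector, at a fixed offset
def innerSet (vec : List Int) (off : Int) (s : List Char) : List Int :=
  s.foldl (fun v c => PySem.List.pySetD v (off + cardIdx c) 1) vec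

lemma suitStep_eq (st : List Int × Int) (suit : List Char) :
    suitStep st suit = (innerSet st.1 st.2 suit, st.2 + 13) := by
  cases suit <;> simp [suitStep, innerSet]

-- sequential form of A's outer fold
def applyAll : List Int → Int → List (List Char) → List Int
  | v, _, [] => v
  | v, off, s :: rest => applyAll (innerSet v off s) (off + 13) rest

lemma foldA : ∀ (suits : List (List Char)) (vec : List Int) (off : Int),
    ((suits.foldl suitStep (vec, off)).1) = applyAll vec off suits := by
  intro suits
  induction suits with
  | nil => intro vec off; rfl
  | cons s rest ih => intro vec off; rw [List.foldl_cons, suitStep_eq]; exact ih _ _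

-- whether some card in the suit list hits absolute index j
def hasCard : List (List Char) → Int → Int → Bool
  | [], _, _ => false
  | s :: rest, off, j => s.any (fun c => off + cardIdx c == j) || hasCard rest (off + 13) j

-- structural well-formedness that Pre_ guarantees for the split suits
def SuitsOK : List (List Char) → Int → Prop
  | [], _ => True
  | s :: rest, off => (∀ c ∈ s, c ∈ cardChars) ∧ (39 < off → s = []) ∧ SuitsOK rest (off + 13)

lemma cardIdx_bounds {c : Char} (h : c ∈ cardChars) : 0 ≤ cardIdx c ∧ cardIdx c ≤ 12 := by
  fin_cases h <;> decide

lemma cardIdx_rank (r : Nat) (h : r < 13) : cardIdx (cardChars[r]!) = r ∧ cardChars[r]! ∈ cardChars := by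
  interval_cases r <;> decide

lemma cardIdx_eq_iff {c : Char} (h : c ∈ cardChars) (r : Nat) (hr : r < 13) :
    (cardIdx c = r) ↔ c = cardChars[r]! := by
  constructor
  · intro he; fin_cases h <;> interval_cases r <;> first | rfl | (exfalso; revert he; decide)
  · intro he; rw [he]; exact (cardIdx_rank r hr).1

lemma getElem!_set (xs : List Int) (n j : Nat) (a : Int) (hj : j < xs.length) :
    (xs.set n a)[j]! = if j = n then a else xs[j]! := by
  have h1 : j < (xs.set n a).length := by rw [List.length_set]; exact hj
  rw [getElem!_pos (xs.set n a) j h1, getElem!_pos xs j hj, List.getElem_set]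
  by_cases h : j = n
  · simp [h]
  · rw [if_neg (fun hh => h hh.symm), if_neg h]

lemma length_innerSet (vec : List Int) (off : Int) (s : List Char) :
    (innerSet vec off s).length = vec.length := by
  induction s generalizing vec with
  | nil => rfl
  | cons c s ih => simp [innerSet, List.foldl_cons] at *; rw [ih]; simp [PySem.List.length_pySetD]

lemma innerSet_get (s : List Char) : ∀ (vec : List Int) (off : Int) (j : Nat),
    vec.length = 52 → j < 52 → 0 ≤ off → off ≤ 39 → (∀ c ∈ s, c ∈ cardChars) →
    (innerSet vec off s)[j]! = if s.any (fun c => off + cardIdx c == (j : Int)) then 1 else vec[j]! := by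
  induction s with
  | nil => intro vec off j _ _ _ _ _; simp [innerSet]
  | cons c s ih =>
    intro vec off j hlen hj hoff hoff2 hg
    have hc : c ∈ cardChars := hg c (by simp)
    obtain ⟨hb1, hb2⟩ := cardIdx_bounds hc
    have hstep : innerSet vec off (c :: s) = innerSet (PySem.List.pySetD vec (off + cardIdx c) 1) off s := rfl
    rw [hstep, ih _ off j (by rw [PySem.List.length_pySetD]; exact hlen) hj hoff hoff2
          (fun c' hc' => hg c' (by simp [hc']))]
    rw [PySem.List.pySetD_of_nonneg vec (v := (1 : Int)) (by omega : (0:Int) ≤ off + cardIdx c)]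
    rw [getElem!_set _ _ _ _ (by omega)]
    by_cases hany : s.any (fun c => off + cardIdx c == (j : Int)) = true
    · rw [if_pos hany, if_pos (by rw [List.any_cons, hany, Bool.or_true])]
    · simp only [Bool.not_eq_true] at hany
      simp only [List.any_cons, hany, Bool.or_false]
      by_cases he : off + cardIdx c = (j : Int)
      · have hn : j = (off + cardIdx c).toNat := by omega
        have hbeq : (off + cardIdx c == (j : Int)) = true := beq_iff_eq.mpr he
        rw [if_pos hn, hbeq]
        simp
      · have hn : ¬ (j = (off + cardIdx c).toNat) := by omega
        have hbeq : (off + cardIdx c == (j : Int)) = false := beq_eq_false_iff_ne.mpr he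
        rw [if_neg hn, hbeq]

lemma applyAll_get : ∀ (suits : List (List Char)) (vec : List Int) (off : Int) (j : Nat),
    vec.length = 52 → j < 52 → 0 ≤ off → SuitsOK suits off →
    (applyAll vec off suits)[j]! = if hasCard suits off (j : Int) then 1 else vec[j]! := by
  intro suits
  induction suits with
  | nil => intro vec off j _ _ _ _; simp [applyAll, hasCard]
  | cons s rest ih =>
    intro vec off j hlen hj hoff hok
    obtain ⟨hg, hemp, hrest⟩ := hok
    have hstep : applyAll vec off (s :: rest) = applyAll (innerSet vec off s) (off + 13) rest := rfl
    rw [hstep, ih _ _ j (by rw [length_innerSet]; exact hlen) hj (by omega) hrest]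
    by_cases hbig : 39 < off
    · have hs : s = [] := hemp hbig
      subst hs
      simp [innerSet, hasCard]
    · rw [innerSet_get s vec off j hlen hj hoff (by omega) hg]
      simp only [hasCard]
      by_cases h1 : hasCard rest (off + 13) (j : Int) = true <;>
        by_cases h2 : s.any (fun c => off + cardIdx c == (j : Int)) = true <;>
        simp [h1, h2]

lemma upperChar_dot (c : Char) : PySem.Chars.upperChar c = '.' ↔ c = '.' := by
  unfold PySem.Chars.upperChar PySem.Chars.islower
  split_ifs with h
  · constructor
    · intro he
      exfalso
      simp at h
      have h1 : 97 ≤ c.toNat := h.1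
      have h2 : c.toNat ≤ 122 := h.2
      have hv : (Char.ofNat (c.toNat - 32)).toNat = c.toNat - 32 := by
        rw [Char.toNat_ofNat]
        exact if_pos (Or.inl (by omega))
      rw [he] at hv
      have hdot : ('.').toNat = 46 := by decide
      omega
    · intro he; subst he; simp at h
  · simp

lemma count_dot_map (xs : List Char) :
    (xs.map PySem.Chars.upperChar).count '.' = xs.count '.' := by
  induction xs with
  | nil => rfl
  | cons c xs ih =>
    simp only [List.map_cons, List.count_cons, ih]
    congr 1
    by_cases h : c = '.'
    · subst h
      rw [(upperChar_dot _).mpr rfl]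
    · have hne : PySem.Chars.upperChar c ≠ '.' := fun hh => h ((upperChar_dot c).mp hh)
      simp [h, hne]

-- flat precondition on the (already upper-cased) character list
def PreL (l : List Char) : Prop :=
  ∀ i : Nat, i < l.length → l[i]! ≠ '.' → (l[i]! ∈ cardChars ∧ (l.take i).count '.' ≤ 3)

lemma mySplit_ok : ∀ (l cur : List Char) (d : Nat),
    (∀ c ∈ cur, c ∈ cardChars) → (4 ≤ d → cur = []) →
    (∀ i : Nat, i < l.length → l[i]! ≠ '.' →
        (l[i]! ∈ cardChars ∧ d + (l.take i).count '.' ≤ 3)) →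
    SuitsOK (mySplit cur l) (13 * (d : Int)) := by
  intro l
  induction l with
  | nil =>
    intro cur d hcur hemp _
    refine ⟨hcur, ?_, trivial⟩
    intro hb
    apply hemp
    omega
  | cons a rest ih =>
    intro cur d hcur hemp hpre
    by_cases ha : a = '.'
    · subst ha
      have hms : mySplit cur ('.' :: rest) = cur :: mySplit [] rest := by simp [mySplit]
      rw [hms]
      refine ⟨hcur, fun hb => hemp (by omega), ?_⟩
      have : (13 : Int) * d + 13 = 13 * ((d + 1 : Nat) : Int) := by push_cast; ring
      rw [this]
      apply ih [] (d + 1) (by simp) (by simp)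
      intro i hi hne
      have := hpre (i + 1) (by simpa using Nat.succ_lt_succ hi) (by simpa using hne)
      simp only [List.take_succ_cons, List.count_cons] at this
      obtain ⟨h1, h2⟩ := this
      refine ⟨by simpa using h1, by simp at h2 ⊢; omega⟩
    · have hms : mySplit cur (a :: rest) = mySplit (cur ++ [a]) rest := by simp [mySplit, ha]
      rw [hms]
      have h0 := hpre 0 (by simp) (by simpa using ha)
      apply ih (cur ++ [a]) d
      · intro c hc
        rcases List.mem_append.mp hc with h | h
        · exact hcur c h
        · simp at h; subst h; simpa using h0.1
      · intro hd; exfalso; have := h0.2; simp at this; omega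
      · intro i hi hne
        have := hpre (i + 1) (by simpa using Nat.succ_lt_succ hi) (by simpa using hne)
        simp only [List.take_succ_cons, List.count_cons] at this
        obtain ⟨h1, h2⟩ := this
        refine ⟨by simpa using h1, ?_⟩
        simp [ha] at h2 ⊢
        omega

lemma hasCard_shift : ∀ (suits : List (List Char)) (off δ j : Int),
    hasCard suits (off + δ) (j + δ) = hasCard suits off j := by
  intro suits
  induction suits with
  | nil => intro off δ j; rfl
  | cons s rest ih =>
    intro off δ j
    simp only [hasCard]
    have h1 : (s.any fun c => off + δ + cardIdx c == j + δ) = s.any fun c => off + cardIdx c == j := by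
      apply List.any_congr rfl
      intro c
      by_cases h : off + cardIdx c = j
      · have : off + δ + cardIdx c = j + δ := by omega
        simp [h, this]
      · have : off + δ + cardIdx c ≠ j + δ := by omega
        simp [h, this]
    have h2 : off + δ + 13 = off + 13 + δ := by ring
    rw [h1, h2, ih]

-- every character of every suit is a card symbol
def AllCards (suits : List (List Char)) : Prop := ∀ t ∈ suits, ∀ c ∈ t, c ∈ cardChars

lemma suitsOK_cards : ∀ (suits : List (List Char)) (off : Int), SuitsOK suits off → AllCards suits := by
  intro suits
  induction suits with
  | nil => intro off _ t ht; simp at ht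
  | cons s rest ih =>
    intro off hok t ht
    rcases List.mem_cons.mp ht with h | h
    · subst h; exact hok.1
    · exact ih (off + 13) hok.2.2 t h

lemma hasCard_lt : ∀ (suits : List (List Char)) (off j : Int),
    AllCards suits → j < off → hasCard suits off j = false := by
  intro suits
  induction suits with
  | nil => intro off j _ _; rfl
  | cons s rest ih =>
    intro off j hall hj
    simp only [hasCard, Bool.or_eq_false_iff]
    constructor
    · simp only [List.any_eq_false]
      intro c hc
      have hb := (cardIdx_bounds (hall s (by simp) c hc)).1
      simp only [beq_iff_eq]
      omega
    · exact ih (off + 13) j (fun t ht => hall t (by simp [ht])) (by omega)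

lemma isIn_singleton (c : Char) (t : List Char) : PySem.Chars.isIn [c] t = decide (c ∈ t) := by
  by_cases h : c ∈ t
  · simp only [h, decide_true]
    rw [PySem.Chars.isIn_iff_infix]
    exact (List.singleton_infix_iff c t).mpr h
  · simp only [h, decide_false]
    rw [PySem.Chars.isIn_eq_false_iff]
    intro hh
    exact h ((List.singleton_infix_iff c t).mp hh)

lemma hasCard_key : ∀ (suits : List (List Char)) (s r : Nat), r < 13 → AllCards suits →
    hasCard suits 0 (13 * (s : Int) + (r : Int)) =
      (decide ((s : Int) < (suits.length : Int)) && decide (cardChars[r]! ∈ suits[s]!)) := by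
  intro suits
  induction suits with
  | nil => intro s r _ _; simp [hasCard]
  | cons t rest ih =>
    intro s r hr hall
    have hallrest : AllCards rest := fun u hu => hall u (by simp [hu])
    have hallt : ∀ c ∈ t, c ∈ cardChars := hall t (by simp)
    cases s with
    | zero =>
      simp only [hasCard, Nat.cast_zero, mul_zero, zero_add]
      have hrest : hasCard rest 13 (r : Int) = false := by
        have := hasCard_shift rest 0 13 ((r : Int) - 13)
        have he : (r : Int) - 13 + 13 = (r : Int) := by ring
        rw [zero_add, he] at this
        rw [this]
        exact hasCard_lt rest 0 _ hallrest (by omega)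
      rw [hrest, Bool.or_false]
      have hany : (t.any fun c => cardIdx c == (r : Int)) = decide (cardChars[r]! ∈ t) := by
        by_cases hm : cardChars[r]! ∈ t
        · simp only [hm, decide_true, List.any_eq_true]
          refine ⟨cardChars[r]!, hm, ?_⟩
          rw [beq_iff_eq]
          exact (cardIdx_rank r hr).1
        · simp only [hm, decide_false, List.any_eq_false]
          intro c hc
          simp only [beq_iff_eq]
          intro he
          exact hm (((cardIdx_eq_iff (hallt c hc) r hr).mp he) ▸ hc)
      rw [hany]
      have hget0 : (t :: rest)[0]! = t := by
        rw [getElem!_pos (t :: rest) 0 (by simp)]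
        exact List.getElem_cons_zero _ _ _
      rw [hget0]
      simp
    | succ s' =>
      simp only [hasCard]
      have hfirst : (t.any fun c => 0 + cardIdx c == 13 * ((s' + 1 : Nat) : Int) + (r : Int)) = false := by
        simp only [List.any_eq_false]
        intro c hc
        obtain ⟨hb1, hb2⟩ := cardIdx_bounds (hallt c hc)
        simp only [beq_iff_eq]
        push_cast
        omega
      rw [hfirst, Bool.false_or]
      have hsh : hasCard rest 13 (13 * ((s' + 1 : Nat) : Int) + (r : Int))
          = hasCard rest 0 (13 * (s' : Int) + (r : Int)) := by
        have := hasCard_shift rest 0 13 (13 * (s' : Int) + (r : Int))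
        rw [zero_add] at this
        have he : 13 * (s' : Int) + (r : Int) + 13 = 13 * ((s' + 1 : Nat) : Int) + (r : Int) := by
          push_cast; ring
        rw [he] at this
        exact this
      rw [show (0 : Int) + 13 = 13 from by norm_num, hsh, ih s' r hr hallrest]
      have hget : (t :: rest)[s' + 1]! = rest[s']! := by
        by_cases h : s' < rest.length
        · rw [getElem!_pos (t :: rest) (s' + 1) (by simpa using Nat.succ_lt_succ h),
              getElem!_pos rest s' h]
          rfl
        · rw [getElem!_neg (t :: rest) (s' + 1) (by simpa using fun hh => h (Nat.lt_of_succ_lt_succ hh)),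
              getElem!_neg rest s' h]
      rw [hget]
      congr 1
      simp only [decide_eq_decide, List.length_cons]
      push_cast
      omega

-- B's per-position entry, under the precondition, tests exactly hasCard
lemma entry_eq (suits : List (List Char)) (hall : AllCards suits) (s r : Int)
    (hs : 0 ≤ s) (hr1 : 0 ≤ r) (hr2 : r < 13) :
    (if decide (s < (suits.length : Int)) &&
        PySem.Chars.isIn [PySem.List.pyGetD ranksB r ' '] (PySem.List.pyGetD suits s [])
     then (1 : Int) else 0)
    = if hasCard suits 0 (13 * s + r) then 1 else 0 := by
  have hsn : s = ((s.toNat : Nat) : Int) := by omega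
  have hrn : r = ((r.toNat : Nat) : Int) := by omega
  rw [hsn, hrn]
  rw [hasCard_key suits s.toNat r.toNat (by omega) hall]
  have hranks : PySem.List.pyGetD ranksB ((r.toNat : Nat) : Int) ' ' = cardChars[r.toNat]! := by
    rw [PySem.List.pyGetD_natCast]
    rw [getElem!_pos cardChars r.toNat (by show r.toNat < 13; omega)]
    exact List.getD_eq_getElem _ _ (by show r.toNat < 13; omega)
  rw [hranks]
  by_cases hlt : ((s.toNat : Nat) : Int) < (suits.length : Int)
  · have hsl : s.toNat < suits.length := by exact_mod_cast hlt
    have hsuit : PySem.List.pyGetD suits ((s.toNat : Nat) : Int) [] = suits[s.toNat]! := by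
      rw [PySem.List.pyGetD_natCast, getElem!_pos suits s.toNat hsl]
      exact List.getD_eq_getElem _ _ hsl
    rw [hsuit, isIn_singleton]
  · have hd : decide (((s.toNat : Nat) : Int) < (suits.length : Int)) = false := decide_eq_false hlt
    rw [hd]
    simp

lemma length_applyAll : ∀ (suits : List (List Char)) (vec : List Int) (off : Int),
    (applyAll vec off suits).length = vec.length := by
  intro suits
  induction suits with
  | nil => intro vec off; rfl
  | cons s rest ih =>
    intro vec off
    show (applyAll (innerSet vec off s) (off + 13) rest).length = _
    rw [ih, length_innerSet]

-- the double literal loop enumerates positions 0..51 in order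
lemma flat52 (g : Int → Int) :
    ([0,1,2,3] : List Int).flatMap
        (fun s => ([0,1,2,3,4,5,6,7,8,9,10,11,12] : List Int).map (fun r => g (13 * s + r)))
      = (List.range 52).map (fun j => g (Int.ofNat j)) := by
  simp only [List.flatMap_cons, List.flatMap_nil, List.map_cons, List.map_nil,
    List.append_nil, List.cons_append, List.nil_append]
  norm_num [List.range_succ]

-- ===== VERDICT (by name: the statement is the Claim_ definition above) =====
theorem hand_to_vec_spec : Claim_equal_hand_to_vec := by
  intro hand _ hpre
  show hand_to_vec hand = hand_to_vec_alt hand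
  have hupper : (PySem.Str.upper hand).toList = hand.toList.map PySem.Chars.upperChar := by
    simp [PySem.Str.upper, PySem.Chars.upper]
  -- the precondition transported to the upper-cased character list
  have hpreL : ∀ i : Nat, i < (PySem.Str.upper hand).toList.length →
      (PySem.Str.upper hand).toList[i]! ≠ '.' →
      ((PySem.Str.upper hand).toList[i]! ∈ cardChars ∧
        0 + ((PySem.Str.upper hand).toList.take i).count '.' ≤ 3) := by
    intro i hi hne
    have hil : i < hand.toList.length := by
      rw [hupper] at hi; simpa using hi
    have hgl : (PySem.Str.upper hand).toList[i]! = PySem.Chars.upperChar hand.toList[i]! := by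
      rw [getElem!_pos _ i hi, getElem!_pos hand.toList i hil]
      simp [hupper]
    have hned : hand.toList[i]! ≠ '.' := by
      intro h; apply hne; rw [hgl, h]; exact (upperChar_dot '.').mpr rfl
    obtain ⟨h1, h2⟩ := hpre i hil hned
    refine ⟨by rw [hgl]; exact h1, ?_⟩
    have hcnt : ((PySem.Str.upper hand).toList.take i).count '.' = (hand.toList.take i).count '.' := by
      rw [hupper, ← List.map_take, count_dot_map]
    omega
  have hok : SuitsOK (mySplit [] (PySem.Str.upper hand).toList) 0 := by
    have := mySplit_ok (PySem.Str.upper hand).toList [] 0 (by simp) (by simp) hpreL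
    simpa using this
  have hall : AllCards (mySplit [] (PySem.Str.upper hand).toList) := suitsOK_cards _ 0 hok
  simp only [hand_to_vec, hand_to_vec_alt]
  rw [foldA, splitOn_eq]
  -- reduce B's ranges to literals
  have hr4 : PySem.List.pyRange 0 4 1 = ([0,1,2,3] : List Int) := by decide
  have hr13 : PySem.List.pyRange 0 13 1 = ([0,1,2,3,4,5,6,7,8,9,10,11,12] : List Int) := by decide
  rw [hr4, hr13]
  -- rewrite B's entries via hasCard
  have hB : ([0,1,2,3] : List Int).flatMap (fun s =>
        ([0,1,2,3,4,5,6,7,8,9,10,11,12] : List Int).map (fun r =>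
          if decide (s < ((mySplit [] (PySem.Str.upper hand).toList).length : Int)) &&
             PySem.Chars.isIn [PySem.List.pyGetD ranksB r ' ']
               (PySem.List.pyGetD (mySplit [] (PySem.Str.upper hand).toList) s [])
          then (1 : Int) else 0))
      = ([0,1,2,3] : List Int).flatMap (fun s =>
        ([0,1,2,3,4,5,6,7,8,9,10,11,12] : List Int).map (fun r =>
          if hasCard (mySplit [] (PySem.Str.upper hand).toList) 0 (13 * s + r)
          then (1 : Int) else 0)) := by
    apply List.flatMap_congr
    intro s hsm
    apply List.map_congr_left
    intro r hrm
    have hs : 0 ≤ s := by fin_cases hsm <;> norm_num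
    have hr1 : 0 ≤ r := by fin_cases hrm <;> norm_num
    have hr2 : r < 13 := by fin_cases hrm <;> norm_num
    exact entry_eq _ hall s r hs hr1 hr2
  rw [hB, flat52 (fun j => if hasCard (mySplit [] (PySem.Str.upper hand).toList) 0 j then (1 : Int) else 0)]
  -- both sides elementwise
  apply List.ext_getElem
  · rw [length_applyAll]
    simp
  · intro j hj1 hj2
    have hj : j < 52 := by
      rw [length_applyAll] at hj1; simpa using hj1
    rw [← getElem!_pos _ j hj1,
        applyAll_get (mySplit [] (PySem.Str.upper hand).toList) (List.replicate 52 0) 0 j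
          (by simp) hj le_rfl hok]
    have hrep : (List.replicate 52 (0 : Int))[j]! = 0 := by
      rw [getElem!_pos (List.replicate 52 (0 : Int)) j (by simpa using hj)]
      exact List.getElem_replicate _
    rw [hrep]
    simp only [List.getElem_map, List.getElem_range]
    rfl
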